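-- pv_equiv track=rewrite | github.com/Fidget278/2022-Algorithm-Study | 개인문제/편근형/groupingDishes.py | solution
-- ===== SOURCE A (Python) =====
-- from collections import defaultdict
--
-- def solution(dishes):
--     d = defaultdict(list)
--     for dish in dishes:
--         food = dish[0]
--         for i in range(1, len(dish)):
--             d[dish[i]].append(food)
--     answer = []
--     for i in d:
--         if len(d[i]) == 1:
--             continue
--         d[i].sort()
--         answer.append([i] + d[i])
--     answer.sort()
--     return answer
-- ===== SOURCE B (Python) =====
-- def solution(dishes):
--     ingredients = sorted({ing for dish in dishes for ing in dish[1:]})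
--     answer = []
--     for ing in ingredients:
--         foods = sorted(dish[0] for dish in dishes for x in dish[1:] if x == ing)
--         if len(foods) > 1:
--             answer.append([ing] + foods)
--     return answer
-- ===== Notes on version B (the rewrite author's own statement) =====
-- stated objective: alternative
-- what changed: Replaced A's defaultdict accumulation followed by per-key sorts and a final sort of the answer rows by sorting the distinct ingredients once up front and collecting each ingredient's foods with a direct comprehension over the dishes (no dict and no final sort; the output is built already in order).
import Mathlib
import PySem

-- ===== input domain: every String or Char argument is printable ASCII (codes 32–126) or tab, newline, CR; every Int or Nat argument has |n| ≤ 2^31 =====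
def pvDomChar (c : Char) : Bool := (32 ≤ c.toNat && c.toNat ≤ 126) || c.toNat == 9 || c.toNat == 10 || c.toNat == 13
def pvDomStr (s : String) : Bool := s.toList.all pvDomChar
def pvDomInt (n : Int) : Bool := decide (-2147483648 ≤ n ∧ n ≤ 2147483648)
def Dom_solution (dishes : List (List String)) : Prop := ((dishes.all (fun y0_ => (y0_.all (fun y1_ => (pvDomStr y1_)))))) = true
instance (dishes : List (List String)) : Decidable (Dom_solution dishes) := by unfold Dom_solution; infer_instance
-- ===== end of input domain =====

-- B replaces A's defaultdict grouping by sorting the distinct ingredients once and collecting each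
-- ingredient's foods by a direct comprehension over the dishes (no dict, no final sort) — alternative decomposition.

-- ===== PORT A =====
-- sorts are ported with the .toList key: Python's str comparison is code-point lexicographic = List Char order
def solution (dishes : List (List String)) : List (List String) :=
  let d : PySem.Dict String (List String) := dishes.foldl (fun d dish =>
    (PySem.List.pyRange 1 (dish.length : Int) 1).foldl
      (fun d i => d.modify (PySem.List.pyGetD dish i "") [] (· ++ [PySem.List.pyGetD dish 0 ""])) d) PySem.Dict.empty
  let answer := d.keys.foldl (fun ans k =>
    if (d.getD k []).length = 1 then ans
    else ans ++ [[k] ++ PySem.List.sorted (d.getD k []) (fun x => x.toList) false]) []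
  PySem.List.sorted answer (fun x => x.map String.toList) false

-- ===== PORT B =====
def solution_alt (dishes : List (List String)) : List (List String) :=
  let ingredients := PySem.List.sorted
    (PySem.Set.ofList (dishes.flatMap (fun dish => PySem.List.slice dish (some 1) none)))
    (fun x => x.toList) false
  ingredients.foldl (fun answer ing =>
    let foods := PySem.List.sorted
      (dishes.flatMap (fun dish =>
        ((PySem.List.slice dish (some 1) none).filter (fun x => x == ing)).map
          (fun _ => PySem.List.pyGetD dish 0 "")))
      (fun x => x.toList) false
    if foods.length > 1 then answer ++ [[ing] ++ foods] else answer) []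

-- ===== PRECONDITION & SPEC =====
-- Pre_ excludes exactly the inputs containing an empty dish, on which Python A raises IndexError at dish[0].
def Pre_solution (dishes : List (List String)) : Prop := ∀ d ∈ dishes, d ≠ []
instance (dishes : List (List String)) : Decidable (Pre_solution dishes) := by unfold Pre_solution; infer_instance
def pvWitness_solution : List (List String) := [["a","x","y"],["b","x"],["c","y","x","x"]]

def Spec_solution (dishes : List (List String)) (out : List (List String)) : Prop := out = solution_alt dishes
instance (dishes : List (List String)) (out : List (List String)) : Decidable (Spec_solution dishes out) := by unfold Spec_solution; infer_instance

-- ===== CLAIM (what is proved, stated in full; the proofs are below) =====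
def Claim_equal_solution : Prop := ∀ (dishes : List (List String)), Dom_solution dishes → Pre_solution dishes → Spec_solution dishes (solution dishes)

-- ===== LEMMAS AND PROOFS =====

-- The (ingredient, food) pairs of all dishes, in A's dict-building order.
def pvL (dishes : List (List String)) : List (String × String) :=
  dishes.flatMap (fun dish => (dish.drop 1).map (fun ing => (ing, PySem.List.pyGetD dish 0 "")))

-- The foods recorded for ingredient k (in A: d[k]; in B: the inner comprehension).
def pvFoods (dishes : List (List String)) (k : String) : List String :=
  ((pvL dishes).filter (fun p => p.1 == k)).map Prod.snd

-- The row emitted for ingredient k.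
def pvRow (dishes : List (List String)) (k : String) : List String :=
  [k] ++ PySem.List.sorted (pvFoods dishes k) (fun x => x.toList) false

-- A's dict is the single pair-list fold.
theorem dictA_eq (dishes : List (List String)) (d0 : PySem.Dict String (List String)) :
    dishes.foldl (fun d dish =>
      (PySem.List.pyRange 1 (dish.length : Int) 1).foldl
        (fun d i => d.modify (PySem.List.pyGetD dish i "") [] (· ++ [PySem.List.pyGetD dish 0 ""])) d) d0
    = (pvL dishes).foldl (fun d p => d.modify p.1 [] (· ++ [p.2])) d0 := by
  induction dishes generalizing d0 with
  | nil => rfl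
  | cons dish rest ih =>
    have hinner :
        (PySem.List.pyRange 1 (dish.length : Int) 1).foldl
          (fun d i => PySem.Dict.modify d (PySem.List.pyGetD dish i "") [] (· ++ [PySem.List.pyGetD dish 0 ""])) d0
        = ((dish.drop 1).map (fun ing => (ing, PySem.List.pyGetD dish 0 ""))).foldl
            (fun d p => d.modify p.1 [] (· ++ [p.2])) d0 := by
      rw [PySem.List.foldl_pyRange_pyGetD' dish ""
        (fun d x => PySem.Dict.modify d x [] (· ++ [PySem.List.pyGetD dish 0 ""])) d0 (by norm_num),
        List.foldl_map]
      rfl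
    simp only [List.foldl_cons, pvL, List.flatMap_cons, List.foldl_append]
    rw [hinner, ih]
    rfl

-- B's inner comprehension collects exactly A's d[k].
theorem comprehension_eq (dishes : List (List String)) (ing : String) :
    dishes.flatMap (fun dish =>
        ((PySem.List.slice dish (some 1) none).filter (fun x => x == ing)).map
          (fun _ => PySem.List.pyGetD dish 0 ""))
    = pvFoods dishes ing := by
  unfold pvFoods
  induction dishes with
  | nil => rfl
  | cons dish rest ih =>
    simp only [List.flatMap_cons, pvL, List.filter_append, List.map_append] at ih ⊢
    rw [ih]
    congr 1
    rw [show PySem.List.slice dish (some 1) none = dish.drop 1 by simp [pysem]]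
    simp [- List.map_tail, List.filter_map, Function.comp_def, List.map_map, List.map_const']

theorem keysA_eq (dishes : List (List String)) :
    ((pvL dishes).foldl (fun d p => d.modify p.1 [] (· ++ [p.2])) PySem.Dict.empty).keys
    = PySem.Set.ofList ((pvL dishes).map Prod.fst) := by
  rw [show (fun (d : PySem.Dict String (List String)) (p : String × String) => d.modify p.1 [] (· ++ [p.2]))
      = (fun d p => d.modify (Prod.fst p) [] ((fun (_ : PySem.Dict String (List String)) (_ : String × String) (v : List String) => v ++ [p.2]) d p)) from rfl]
  rw [PySem.Dict.keys_foldl_modify_key (pvL dishes) Prod.fst []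
    (fun d p v => v ++ [p.2]) PySem.Dict.empty]
  rfl

theorem fsts_eq (dishes : List (List String)) :
    (pvL dishes).map Prod.fst = dishes.flatMap (fun dish => PySem.List.slice dish (some 1) none) := by
  simp only [pvL, List.map_flatMap, List.map_map]
  refine List.flatMap_congr (fun dish _ => ?_)
  simp [pysem, Function.comp_def]

theorem foods_ne_nil (dishes : List (List String)) (k : String)
    (hk : k ∈ PySem.Set.ofList ((pvL dishes).map Prod.fst)) : pvFoods dishes k ≠ [] := by
  rw [PySem.Set.mem_ofList] at hk
  obtain ⟨p, hp, hpk⟩ := List.mem_map.mp hk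
  unfold pvFoods
  simp only [ne_eq, List.map_eq_nil_iff, List.filter_eq_nil_iff, not_forall]
  exact ⟨p, hp, by simp [hpk]⟩

-- A computes: sort the rows of the multi-food keys, in key-insertion order.
theorem solA_char (dishes : List (List String)) :
    solution dishes = PySem.List.sorted
      (((PySem.Set.ofList ((pvL dishes).map Prod.fst)).filter
          (fun k => !((pvFoods dishes k).length == 1))).map (pvRow dishes))
      (fun x => x.map String.toList) false := by
  unfold solution
  dsimp only
  rw [dictA_eq, keysA_eq]
  congr 1
  have hcongr := PySem.List.foldl_congr_mem'
    (PySem.Set.ofList ((pvL dishes).map Prod.fst))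
    (fun ans k =>
      if (((pvL dishes).foldl (fun d p => d.modify p.1 [] (· ++ [p.2])) PySem.Dict.empty).getD k []).length = 1
      then ans
      else ans ++ [[k] ++ PySem.List.sorted
        (((pvL dishes).foldl (fun d p => d.modify p.1 [] (· ++ [p.2])) PySem.Dict.empty).getD k [])
        (fun x => x.toList) false])
    (fun ans k => if (!((pvFoods dishes k).length == 1)) = true then ans ++ [pvRow dishes k] else ans)
    []
    (by
      intro k hk ans
      dsimp only
      rw [PySem.Dict.getD_foldl_modify_append]
      simp [pvFoods, pvRow, PySem.Dict.getD_empty])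
  rw [hcongr, PySem.List.foldl_append_if]
  rfl

-- B computes: the rows of the multi-food keys, in sorted key order.
theorem solB_char (dishes : List (List String)) :
    solution_alt dishes =
      ((PySem.List.sorted (PySem.Set.ofList ((pvL dishes).map Prod.fst)) (fun x => x.toList) false).filter
          (fun k => !((pvFoods dishes k).length == 1))).map (pvRow dishes) := by
  unfold solution_alt
  dsimp only
  rw [← fsts_eq]
  have hcongr := PySem.List.foldl_congr_mem'
    (PySem.List.sorted (PySem.Set.ofList ((pvL dishes).map Prod.fst)) (fun x => x.toList) false)
    (fun answer ing =>
      if (PySem.List.sorted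
            (dishes.flatMap (fun dish =>
              ((PySem.List.slice dish (some 1) none).filter (fun x => x == ing)).map
                (fun _ => PySem.List.pyGetD dish 0 "")))
            (fun x => x.toList) false).length > 1
      then answer ++ [[ing] ++ PySem.List.sorted
            (dishes.flatMap (fun dish =>
              ((PySem.List.slice dish (some 1) none).filter (fun x => x == ing)).map
                (fun _ => PySem.List.pyGetD dish 0 "")))
            (fun x => x.toList) false]
      else answer)
    (fun ans k => if (!((pvFoods dishes k).length == 1)) = true then ans ++ [pvRow dishes k] else ans)
    []
    (by
      intro k hk ans
      dsimp only
      rw [comprehension_eq, PySem.List.length_sorted]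
      have hne := foods_ne_nil dishes k ((PySem.List.mem_sorted _ _ _ _).mp hk)
      have hlen : (pvFoods dishes k).length ≠ 0 := by
        simpa [List.length_eq_zero_iff] using hne
      by_cases h : (pvFoods dishes k).length = 1
      · simp [h]
      · have : 1 < (pvFoods dishes k).length := by omega
        simp [h, this, pvRow])
  rw [hcongr, PySem.List.foldl_append_if]
  rfl

theorem row_lt_row (dishes : List (List String)) (a b : String) (h : a.toList < b.toList) :
    (pvRow dishes a).map String.toList < (pvRow dishes b).map String.toList := by
  unfold pvRow
  simp only [List.map_cons, List.cons_append, List.nil_append, List.cons_lt_cons_iff]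
  exact Or.inl h

-- the sorted result does not depend on which (propositionally equal) order instances were elaborated
theorem sorted_inst_irrel {A K : Type} (i1 i2 : LT K) (d1 : @DecidableLT K i1) (d2 : @DecidableLT K i2)
    (h : i1 = i2) (xs : List A) (key : A → K) (rev : Bool) :
    @PySem.List.sorted A K i1 d1 xs key rev = @PySem.List.sorted A K i2 d2 xs key rev := by
  subst h
  congr 1

theorem mainlemma (dishes : List (List String)) : solution dishes = solution_alt dishes := by
  rw [solA_char, solB_char]
  have hperm : (((PySem.List.sorted (PySem.Set.ofList ((pvL dishes).map Prod.fst)) (fun x : String => x.toList) false).filter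
        (fun k => !((pvFoods dishes k).length == 1))).map (pvRow dishes)).Perm
      (((PySem.Set.ofList ((pvL dishes).map Prod.fst)).filter
        (fun k => !((pvFoods dishes k).length == 1))).map (pvRow dishes)) :=
    ((PySem.List.sorted_perm _ _ _).filter _).map _
  have hle := PySem.List.sorted_pairwise (PySem.Set.ofList ((pvL dishes).map Prod.fst)) (fun x : String => x.toList)
  rw [← sorted_inst_irrel _ _ _ _ rfl _ _ _] at hle
  have hnd : (PySem.List.sorted (PySem.Set.ofList ((pvL dishes).map Prod.fst)) (fun x : String => x.toList) false).Pairwise (fun a b => a ≠ b) :=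
    (PySem.List.sorted_perm _ _ _).nodup_iff.mpr (PySem.Set.nodup_ofList _)
  have hs : (PySem.List.sorted (PySem.Set.ofList ((pvL dishes).map Prod.fst)) (fun x : String => x.toList) false).Pairwise
      (fun a b => a.toList < b.toList) := by
    refine (hle.and hnd).imp ?_
    rintro a b ⟨h1, h2⟩
    exact lt_of_le_of_ne h1 (fun he => h2 (String.toList_inj.mp he))
  have hpw : (((PySem.List.sorted (PySem.Set.ofList ((pvL dishes).map Prod.fst)) (fun x : String => x.toList) false).filter
        (fun k => !((pvFoods dishes k).length == 1))).map (pvRow dishes)).Pairwise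
      (fun a b => a.map String.toList < b.map String.toList) :=
    (hs.filter _).map (pvRow dishes) (fun a b h => row_lt_row dishes a b h)
  have H := PySem.List.sorted_eq_of_perm_of_pairwise_lt _ _ (fun x : List String => x.map String.toList) hperm hpw
  refine Eq.trans ?_ H
  exact sorted_inst_irrel _ _ _ _ rfl _ _ _

-- ===== VERDICT (by name: the statement is the Claim_ definition above) =====
theorem solution_spec : Claim_equal_solution := by
  intro dishes _ _
  unfold Spec_solution
  exact mainlemma dishes
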